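-- pv_equiv track=rewrite | github.com/zhoumeng-creater/Babel | autism/evaluation/evaluation_helpers.py | check_stereotyped_language
-- ===== SOURCE A (Python) =====
-- from typing import List, Dict, Any
--
-- def check_stereotyped_language(child_lines: List[str]) -> bool:
--     """检查语言刻板重复"""
--     if len(child_lines) < 3:
--         return False
--
--     # 检查是否有重复的句式
--     phrases = [line.split(":")[-1] if ":" in line else line for line in child_lines]
--     for i in range(len(phrases) - 2):
--         if phrases[i] == phrases[i+2]:  # 隔句重复
--             return True
--
--     return False
-- ===== SOURCE B (Python) =====
-- from typing import List
--
-- def check_stereotyped_language(child_lines: List[str]) -> bool: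
--     """Group-by-phrase index: map each phrase to its positions, then look for a gap-2 pair."""
--     if len(child_lines) < 3:
--         return False
--     phrases = [line.split(":")[-1] if ":" in line else line for line in child_lines]
--     positions = {}
--     for idx, phrase in enumerate(phrases):
--         positions.setdefault(phrase, []).append(idx)
--     for pos_list in positions.values():
--         pos_set = set(pos_list)
--         if any(q + 2 in pos_set for q in pos_list):
--             return True
--     return False
-- ===== Notes on version B (the rewrite author's own statement) =====
-- stated objective: alternative
-- what changed: Replaces A's indexed scan comparing phrases[i] with phrases[i+2] by a group-by-value index: one pass builds a dict mapping each phrase to its list of positions, then each position group is checked for a pair q, q+2 via set membership.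
import Mathlib
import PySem

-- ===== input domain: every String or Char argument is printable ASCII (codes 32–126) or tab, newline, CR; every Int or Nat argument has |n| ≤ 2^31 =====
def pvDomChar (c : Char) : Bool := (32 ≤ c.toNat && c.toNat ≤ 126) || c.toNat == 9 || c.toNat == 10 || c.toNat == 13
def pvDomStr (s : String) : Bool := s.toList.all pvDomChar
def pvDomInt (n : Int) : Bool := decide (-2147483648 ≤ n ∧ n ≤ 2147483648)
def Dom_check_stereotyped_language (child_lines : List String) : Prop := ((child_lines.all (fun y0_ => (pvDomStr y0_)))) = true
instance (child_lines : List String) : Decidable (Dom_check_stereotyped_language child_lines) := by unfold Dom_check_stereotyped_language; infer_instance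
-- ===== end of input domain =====

-- B replaces A's indexed gap-2 neighbour scan by a group-by-phrase position index
-- (dict phrase → positions, then look for q and q+2 in one group); objective: alternative.

-- shared helper: both Pythons compute the phrase of a line by the same expression
-- `line.split(":")[-1] if ":" in line else line`
def pvPhrase (line : String) : String :=
  if PySem.Str.isIn ":" line then
    (PySem.List.pyGet? ((PySem.Str.split? line ":").getD []) (-1)).getD ""
  else line

-- ===== PORT A =====
def check_stereotyped_language (child_lines : List String) : Bool :=
  if child_lines.length < 3 then false
  else
    let phrases := child_lines.map pvPhrase
    (PySem.List.pyRange 0 ((phrases.length : Int) - 2)).any (fun i =>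
      PySem.List.pyGetD phrases i "" == PySem.List.pyGetD phrases (i + 2) "")

-- ===== PORT B =====
def check_stereotyped_language_alt (child_lines : List String) : Bool :=
  if child_lines.length < 3 then false
  else
    let phrases := child_lines.map pvPhrase
    let positions : PySem.Dict String (List Int) :=
      (PySem.List.enumerate phrases).foldl
        (fun d p => d.modify p.2 [] (fun l => l ++ [p.1])) PySem.Dict.empty
    positions.values.any (fun posList =>
      let posSet : PySem.Set Int := PySem.Set.ofList posList
      posList.any (fun q => posSet.contains (q + 2)))

-- ===== PRECONDITION & SPEC =====
def Spec_check_stereotyped_language (child_lines : List String) (out : Bool) : Prop := out = check_stereotyped_language_alt child_lines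
instance (child_lines : List String) (out : Bool) : Decidable (Spec_check_stereotyped_language child_lines out) := by unfold Spec_check_stereotyped_language; infer_instance

-- ===== CLAIM (what is proved, stated in full; the proofs are below) =====
def Claim_equal_check_stereotyped_language : Prop := ∀ (child_lines : List String), Dom_check_stereotyped_language child_lines → Spec_check_stereotyped_language child_lines (check_stereotyped_language child_lines)

-- ===== LEMMAS AND PROOFS =====

-- the common characterisation: some phrase repeats at distance 2
def pvHasGap (phrases : List String) : Prop :=
  ∃ k : Nat, k + 2 < phrases.length ∧ phrases.getD k "" = phrases.getD (k + 2) ""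

lemma check_A_iff (ls : List String) :
    check_stereotyped_language ls = true ↔ pvHasGap (ls.map pvPhrase) := by
  unfold check_stereotyped_language pvHasGap
  by_cases h : ls.length < 3
  · simp only [if_pos h]
    constructor
    · intro hf; exact absurd hf (by simp)
    · rintro ⟨k, hk, -⟩; simp at hk ⊢; omega
  · simp only [if_neg h]
    rw [not_lt] at h
    rw [PySem.List.pyRange_one]
    simp only [List.any_map, List.any_eq_true, List.mem_range, Function.comp, List.length_map]
    constructor
    · rintro ⟨k, hk, hpred⟩
      refine ⟨k, by omega, ?_⟩
      rw [PySem.List.pyGetD_of_nonneg _ _ (by omega), PySem.List.pyGetD_of_nonneg _ _ (by omega)] at hpred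
      have h1 : ((0 : Int) + (k:Int)).toNat = k := by omega
      have h2 : ((0 : Int) + (k:Int) + 2).toNat = k + 2 := by omega
      rw [h1, h2] at hpred
      exact beq_iff_eq.mp hpred
    · rintro ⟨k, hk, heq⟩
      refine ⟨k, by omega, ?_⟩
      rw [PySem.List.pyGetD_of_nonneg _ _ (by omega), PySem.List.pyGetD_of_nonneg _ _ (by omega)]
      have h1 : ((0 : Int) + (k:Int)).toNat = k := by omega
      have h2 : ((0 : Int) + (k:Int) + 2).toNat = k + 2 := by omega
      rw [h1, h2]
      exact beq_iff_eq.mpr heq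

-- the group-by dict maps each phrase c to the list of its positions
lemma dict_getD (phrases : List String) (c : String) :
    ((PySem.List.enumerate phrases).foldl
        (fun d p => d.modify p.2 [] (fun l => l ++ [p.1])) PySem.Dict.empty).getD c []
      = (PySem.List.pyRange 0 (phrases.length : Int)).filter
          (fun j => PySem.List.pyGetD phrases j "" == c) := by
  have hfold : ((PySem.List.enumerate phrases).map Prod.swap).foldl
      (fun (d : PySem.Dict String (List Int)) (q : String × Int) => d.modify q.1 [] (fun l => l ++ [q.2]))
      PySem.Dict.empty
      = (PySem.List.enumerate phrases).foldl
        (fun d p => d.modify p.2 [] (fun l => l ++ [p.1])) PySem.Dict.empty :=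
    List.foldl_map
  rw [← hfold, PySem.Dict.getD_foldl_modify_append, PySem.Dict.getD_empty]
  rw [PySem.List.enumerate_eq_map_pyRange phrases ""]
  simp only [List.filter_map, List.map_map, Function.comp_def]
  simp [PySem.List.len]

-- its keys are exactly the distinct phrases
lemma dict_keys (phrases : List String) :
    ((PySem.List.enumerate phrases).foldl
        (fun d p => d.modify p.2 [] (fun l => l ++ [p.1])) PySem.Dict.empty).keys
      = PySem.Set.ofList phrases := by
  rw [PySem.Dict.keys_foldl_modify_key (PySem.List.enumerate phrases)
        (fun (p : Int × String) => p.2) ([] : List Int)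
        (fun (_ : PySem.Dict String (List Int)) (p : Int × String) (l : List Int) => l ++ [p.1])
        PySem.Dict.empty]
  rw [PySem.List.map_snd_enumerate]
  simp [PySem.Set.update_nil_left, PySem.Dict.keys_empty]

lemma dict_nodup (phrases : List String) :
    ((PySem.List.enumerate phrases).foldl
        (fun d p => d.modify p.2 [] (fun l => l ++ [p.1])) PySem.Dict.empty).keys.Nodup :=
  PySem.Dict.nodup_keys_foldl_modify_key (PySem.List.enumerate phrases)
    (fun (p : Int × String) => p.2) ([] : List Int)
    (fun (_ : PySem.Dict String (List Int)) (p : Int × String) (l : List Int) => l ++ [p.1])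
    PySem.Dict.empty (by simp [PySem.Dict.keys_empty])

lemma check_B_iff (ls : List String) :
    check_stereotyped_language_alt ls = true ↔ pvHasGap (ls.map pvPhrase) := by
  unfold check_stereotyped_language_alt
  by_cases h : ls.length < 3
  · simp only [if_pos h]
    constructor
    · intro hf; exact absurd hf (by simp)
    · rintro ⟨k, hk, -⟩; simp at hk ⊢; omega
  · simp only [if_neg h]
    rw [not_lt] at h
    set phrases := ls.map pvPhrase with hphr
    set d := (PySem.List.enumerate phrases).foldl
        (fun d p => d.modify p.2 [] (fun l => l ++ [p.1])) PySem.Dict.empty with hd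
    rw [PySem.Dict.values_eq_map_keys d (dict_nodup phrases) []]
    rw [dict_keys phrases]
    simp only [List.any_map, List.any_eq_true, Function.comp]
    constructor
    · rintro ⟨c, hc, q, hq, hmem⟩
      rw [dict_getD phrases c] at hq hmem
      rw [PySem.Set.contains_iff, PySem.Set.mem_ofList] at hmem
      rw [List.mem_filter] at hq hmem
      obtain ⟨hq1, hq2⟩ := hq
      obtain ⟨hm1, hm2⟩ := hmem
      rw [PySem.List.mem_pyRange_one] at hq1 hm1
      refine ⟨q.toNat, by omega, ?_⟩
      rw [PySem.List.pyGetD_of_nonneg _ _ (by omega)] at hq2 hm2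
      have : (q + 2).toNat = q.toNat + 2 := by omega
      rw [this] at hm2
      rw [beq_iff_eq] at hq2 hm2
      rw [hq2, hm2]
    · rintro ⟨k, hk, heq⟩
      have hkl : k + 2 < phrases.length := hk
      refine ⟨phrases.getD k "", ?_, (k : Int), ?_, ?_⟩
      · rw [PySem.Set.mem_ofList]
        rw [List.getD_eq_getElem _ _ (by omega)]
        exact List.getElem_mem _
      · rw [dict_getD phrases _]
        rw [List.mem_filter, PySem.List.mem_pyRange_one]
        refine ⟨⟨by omega, by exact_mod_cast by omega⟩, ?_⟩
        rw [PySem.List.pyGetD_of_nonneg _ _ (by omega)]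
        simp
      · rw [dict_getD phrases _]
        rw [PySem.Set.contains_iff, PySem.Set.mem_ofList, List.mem_filter,
            PySem.List.mem_pyRange_one]
        refine ⟨⟨by omega, by exact_mod_cast by omega⟩, ?_⟩
        rw [PySem.List.pyGetD_of_nonneg _ _ (by omega)]
        have : ((k : Int) + 2).toNat = k + 2 := by omega
        rw [this, beq_iff_eq, ← heq]

-- ===== VERDICT (by name: the statement is the Claim_ definition above) =====
theorem check_stereotyped_language_spec : Claim_equal_check_stereotyped_language := by
  intro ls _
  unfold Spec_check_stereotyped_language
  have := (check_A_iff ls).trans (check_B_iff ls).symm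
  cases hA : check_stereotyped_language ls <;> cases hB : check_stereotyped_language_alt ls <;>
    simp_all
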